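-- pv_equiv track=rewrite | github.com/kelvinrafaeli/portalSinaisCripto | backend/app/services/exchange.py | _convert_symbol
-- ===== SOURCE A (Python) =====
-- def _convert_symbol(symbol: str) -> str:
--     """
--     Converte BTCUSDT para BTC/USDT.
--     """
--     # Remover sufixos comuns
--     base_quotes = [
--         ("USDT", "/USDT"),
--         ("BUSD", "/BUSD"),
--         ("USDC", "/USDC"),
--         ("BTC", "/BTC"),
--         ("ETH", "/ETH"),
--     ]
--
--     for suffix, replacement in base_quotes:
--         if symbol.endswith(suffix):
--             base = symbol[:-len(suffix)]
--             return f"{base}{replacement}"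
--
--     return symbol
-- ===== SOURCE B (Python) =====
-- def _convert_symbol(symbol: str) -> str:
--     """
--     Converte BTCUSDT para BTC/USDT.
--     """
--     # Leftmost-match scan over split positions (the semantics of
--     # re.sub(r"(USDT|BUSD|USDC|BTC|ETH)$", r"/\1", symbol)): walk the string
--     # left to right and return at the first position whose tail is a known
--     # quote; no (suffix, replacement) table and no endswith tests.
--     quotes = ("USDT", "BUSD", "USDC", "BTC", "ETH")
--     for i in range(len(symbol) + 1):
--         tail = symbol[i:]
--         if tail in quotes:
--             return symbol[:i] + "/" + tail
--     return symbol
-- ===== Notes on version B (the rewrite author's own statement) =====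
-- stated objective: alternative
-- what changed: Replaces the loop over five (suffix, replacement) pairs with a left-to-right scan over split positions that returns at the first position whose entire tail is a known quote (anchored-regex leftmost-match semantics); correct because a match can only occur where a quote is a suffix, and no quote is a suffix of another.
import Mathlib
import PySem

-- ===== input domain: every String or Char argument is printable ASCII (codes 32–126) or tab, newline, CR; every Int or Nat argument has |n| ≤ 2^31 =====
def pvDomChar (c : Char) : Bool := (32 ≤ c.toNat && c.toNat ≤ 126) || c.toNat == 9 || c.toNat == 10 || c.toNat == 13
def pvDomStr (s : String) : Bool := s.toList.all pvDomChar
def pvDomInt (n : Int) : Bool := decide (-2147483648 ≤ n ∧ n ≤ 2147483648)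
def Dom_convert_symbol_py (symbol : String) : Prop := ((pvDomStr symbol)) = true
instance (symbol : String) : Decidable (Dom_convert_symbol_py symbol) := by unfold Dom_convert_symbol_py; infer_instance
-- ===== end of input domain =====

-- B replaces A's loop over five (suffix, replacement) pairs by a left-to-right scan over
-- split positions, returning at the first position whose whole tail is a known quote
-- (alternative decomposition; same result).


-- ===== PORT A =====
-- 'for suffix, replacement in base_quotes: if symbol.endswith(suffix): return symbol[:-len(suffix)] + replacement'
def pvA_loop (cs : List Char) : List (List Char × List Char) → Option (List Char)
  | [] => none
  | (suffix, replacement) :: rest =>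
      if PySem.Chars.endswith cs suffix then
        some (PySem.List.slice cs none (some (-(suffix.length : Int))) ++ replacement)
      else pvA_loop cs rest

def convert_symbol_py (symbol : String) : String :=
  let base_quotes : List (List Char × List Char) :=
    [("USDT".toList, "/USDT".toList), ("BUSD".toList, "/BUSD".toList),
     ("USDC".toList, "/USDC".toList), ("BTC".toList, "/BTC".toList),
     ("ETH".toList, "/ETH".toList)]
  match pvA_loop symbol.toList base_quotes with
  | some r => String.ofList r
  | none => symbol

-- ===== PORT B =====
-- 'tail in quotes' for the tuple ("USDT","BUSD","USDC","BTC","ETH"): successive equality tests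
def pvB_try (t : List Char) : Option (List Char) :=
  if t = "USDT".toList then some ("/USDT".toList)
  else if t = "BUSD".toList then some ("/BUSD".toList)
  else if t = "USDC".toList then some ("/USDC".toList)
  else if t = "BTC".toList then some ("/BTC".toList)
  else if t = "ETH".toList then some ("/ETH".toList)
  else none

-- 'for i in range(len(symbol)+1): tail = symbol[i:]; if tail in quotes: return symbol[:i] + "/" + tail'
-- ported as structural recursion on the tail: advancing i by one peels one char off the
-- tail and appends it back onto the prefix of the result (symbol[:i] + "/" + tail).
def pvB_scan (cs : List Char) : Option (List Char) :=
  match pvB_try cs with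
  | some r => some r
  | none =>
    match cs with
    | [] => none
    | c :: rest => (pvB_scan rest).map (c :: ·)

def convert_symbol_py_alt (symbol : String) : String :=
  match pvB_scan symbol.toList with
  | some r => String.ofList r
  | none => symbol

-- ===== PRECONDITION & SPEC =====
def Spec_convert_symbol_py (symbol : String) (out : String) : Prop := out = convert_symbol_py_alt symbol
instance (symbol : String) (out : String) : Decidable (Spec_convert_symbol_py symbol out) := by unfold Spec_convert_symbol_py; infer_instance

-- ===== CLAIM (what is proved, stated in full; the proofs are below) =====
def Claim_equal_convert_symbol_py : Prop := ∀ (symbol : String), Dom_convert_symbol_py symbol → Spec_convert_symbol_py symbol (convert_symbol_py symbol)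

-- ===== LEMMAS AND PROOFS =====

-- canonical form both ports are reduced to
def pvCanon (cs : List Char) : Option (List Char) :=
  if "USDT".toList <:+ cs then some (cs.take (cs.length - 4) ++ "/USDT".toList)
  else if "BUSD".toList <:+ cs then some (cs.take (cs.length - 4) ++ "/BUSD".toList)
  else if "USDC".toList <:+ cs then some (cs.take (cs.length - 4) ++ "/USDC".toList)
  else if "BTC".toList <:+ cs then some (cs.take (cs.length - 3) ++ "/BTC".toList)
  else if "ETH".toList <:+ cs then some (cs.take (cs.length - 3) ++ "/ETH".toList)
  else none

lemma pvA_eq_canon (cs : List Char) :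
    pvA_loop cs
      [("USDT".toList, "/USDT".toList), ("BUSD".toList, "/BUSD".toList),
       ("USDC".toList, "/USDC".toList), ("BTC".toList, "/BTC".toList),
       ("ETH".toList, "/ETH".toList)] = pvCanon cs := by
  simp only [pvA_loop, pvCanon, PySem.Chars.endswith_iff,
    show ("USDT".toList.length : Int) = (4:Int) from rfl,
    show ("BUSD".toList.length : Int) = (4:Int) from rfl,
    show ("USDC".toList.length : Int) = (4:Int) from rfl,
    show ("BTC".toList.length : Int) = (3:Int) from rfl,
    show ("ETH".toList.length : Int) = (3:Int) from rfl,
    PySem.List.slice_to_neg_ofNat cs 4 (by omega),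
    PySem.List.slice_to_neg_ofNat cs 3 (by omega)]

lemma pvB_eq_canon (cs : List Char) : pvB_scan cs = pvCanon cs := by
  induction cs with
  | nil => decide
  | cons c rest ih =>
    by_cases h : pvB_try (c :: rest) = none
    · -- no quote equals the whole string: suffix tests reduce to tests on the tail
      have hne : c :: rest ≠ "USDT".toList ∧ c :: rest ≠ "BUSD".toList ∧
          c :: rest ≠ "USDC".toList ∧ c :: rest ≠ "BTC".toList ∧ c :: rest ≠ "ETH".toList := by
        unfold pvB_try at h
        split_ifs at h with h1 h2 h3 h4 h5
        exact ⟨h1, h2, h3, h4, h5⟩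
      obtain ⟨h1, h2, h3, h4, h5⟩ := hne
      have hs : ∀ (a : List Char), a ≠ c :: rest → (a <:+ c :: rest ↔ a <:+ rest) := by
        intro a ha
        rw [List.suffix_cons_iff]
        simp [ha]
      rw [pvB_scan, h, ih]
      unfold pvCanon
      simp only [hs _ (Ne.symm h1), hs _ (Ne.symm h2), hs _ (Ne.symm h3), hs _ (Ne.symm h4), hs _ (Ne.symm h5)]
      split_ifs with g1 g2 g3 g4 g5
      · have hl : 4 ≤ rest.length := g1.length_le
        simp only [Option.map_some, List.length_cons,
          show rest.length + 1 - 4 = (rest.length - 4) + 1 by omega, List.take_succ_cons, List.cons_append]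
      · have hl : 4 ≤ rest.length := g2.length_le
        simp only [Option.map_some, List.length_cons,
          show rest.length + 1 - 4 = (rest.length - 4) + 1 by omega, List.take_succ_cons, List.cons_append]
      · have hl : 4 ≤ rest.length := g3.length_le
        simp only [Option.map_some, List.length_cons,
          show rest.length + 1 - 4 = (rest.length - 4) + 1 by omega, List.take_succ_cons, List.cons_append]
      · have hl : 3 ≤ rest.length := g4.length_le
        simp only [Option.map_some, List.length_cons,
          show rest.length + 1 - 3 = (rest.length - 3) + 1 by omega, List.take_succ_cons, List.cons_append]
      · have hl : 3 ≤ rest.length := g5.length_le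
        simp only [Option.map_some, List.length_cons,
          show rest.length + 1 - 3 = (rest.length - 3) + 1 by omega, List.take_succ_cons, List.cons_append]
      · rfl
    · -- the whole string is one of the five quotes: both sides are that literal value
      unfold pvB_try at h
      split_ifs at h with h1 h2 h3 h4 h5
      · rw [h1]; decide
      · rw [h2]; decide
      · rw [h3]; decide
      · rw [h4]; decide
      · rw [h5]; decide
      · exact absurd rfl h

-- ===== VERDICT (by name: the statement is the Claim_ definition above) =====
theorem convert_symbol_py_spec : Claim_equal_convert_symbol_py := by
  intro symbol _
  unfold Spec_convert_symbol_py convert_symbol_py convert_symbol_py_alt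
  simp only [pvA_eq_canon, pvB_eq_canon]
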